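-- pv_equiv track=rewrite | github.com/bikuz/carbonapi | mrv/data_import_utils.py | _create_column_mapping
-- ===== SOURCE A (Python) =====
-- from typing import Dict, List, Tuple, Optional, Any
--
-- def _create_column_mapping(source_columns: Dict[str, str], target_columns: Dict[str, str]) -> Dict[str, str]:
--     """Create mapping between source and target columns"""
--     mapping = {}
--
--     # Direct name matches (case-insensitive)
--     for source_col, source_type in source_columns.items():
--         for target_col, target_type in target_columns.items():
--             if source_col.lower() == target_col.lower():
--                 mapping[source_col] = target_col
--                 break
--
--     # Add common aliases and mappings for forest biometric data
--     aliases = {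
--         'dbh': ['diameter', 'dbh_cm', 'diameter_cm', 'tree_and_climber_dbh'],
--         'height': ['ht', 'height_m', 'tree_height'],
--         'species_code': ['species', 'sp_code', 'species_id', 'tree_and_climber_species_code'],
--         'plot_id': ['plot', 'plot_number', 'plot_no', 'plot_id_'],
--         'tree_no': ['tree_id', 'tree_number', 'tree'],
--         'plot_col': ['col', 'column'],
--         'plot_row': ['row'],
--         'plot_number': ['number', 'plot_num'],
--         'plot_x': ['utm_coordinate_x', 'x_coordinate', 'x'],
--         'plot_y': ['utm_coordinate_y', 'y_coordinate', 'y'],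
--         'forest_stand': ['tree_and_climber_forest_stand', 'stand'],
--         'bearing': ['tree_and_climber_bearing'],
--         'distance': ['tree_and_climber_distance'],
--         'quality_class': ['quality_class'],
--         'quality_class_code': ['quality_class_code_id_'],
--         'crown_class': ['crown_class'],
--         'crown_class_code': ['crown_class_code_id_'],
--         'sample_tree_type': ['sample_tree_type'],
--         'sample_tree_type_code': ['sample_tree_type_code_id_'],
--         'crown_height': ['crown_height'],
--         'base_tree_height': ['base_tree_height'],
--         'base_crown_height': ['base_crown_height'],
--         'base_slope': ['base_slope'],
--         'age': ['age'],
--         'radial_growth': ['radial_growth'],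
--         'phy_zone': ['physiography_zone', 'physiographic_zone'],
--         'district_code': ['district']
--     }
--
--     for target_col in target_columns.keys():
--         if target_col not in mapping.values():  # Not already mapped
--             target_lower = target_col.lower()
--
--             # Check aliases
--             for alias_group in aliases.values():
--                 if target_lower in [a.lower() for a in alias_group]:
--                     for source_col in source_columns.keys():
--                         source_lower = source_col.lower()
--                         if source_lower in [a.lower() for a in alias_group] and source_col not in mapping:
--                             mapping[source_col] = target_col
--                             break
--
--     return mapping
-- ===== SOURCE B (Python) =====
-- from typing import Dict
--
-- def _create_column_mapping(source_columns: Dict[str, str], target_columns: Dict[str, str]) -> Dict[str, str]: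
--     """Create mapping between source and target columns (bucket-queue formulation)"""
--     aliases = {
--         'dbh': ['diameter', 'dbh_cm', 'diameter_cm', 'tree_and_climber_dbh'],
--         'height': ['ht', 'height_m', 'tree_height'],
--         'species_code': ['species', 'sp_code', 'species_id', 'tree_and_climber_species_code'],
--         'plot_id': ['plot', 'plot_number', 'plot_no', 'plot_id_'],
--         'tree_no': ['tree_id', 'tree_number', 'tree'],
--         'plot_col': ['col', 'column'],
--         'plot_row': ['row'],
--         'plot_number': ['number', 'plot_num'],
--         'plot_x': ['utm_coordinate_x', 'x_coordinate', 'x'],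
--         'plot_y': ['utm_coordinate_y', 'y_coordinate', 'y'],
--         'forest_stand': ['tree_and_climber_forest_stand', 'stand'],
--         'bearing': ['tree_and_climber_bearing'],
--         'distance': ['tree_and_climber_distance'],
--         'quality_class': ['quality_class'],
--         'quality_class_code': ['quality_class_code_id_'],
--         'crown_class': ['crown_class'],
--         'crown_class_code': ['crown_class_code_id_'],
--         'sample_tree_type': ['sample_tree_type'],
--         'sample_tree_type_code': ['sample_tree_type_code_id_'],
--         'crown_height': ['crown_height'],
--         'base_tree_height': ['base_tree_height'],
--         'base_crown_height': ['base_crown_height'],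
--         'base_slope': ['base_slope'],
--         'age': ['age'],
--         'radial_growth': ['radial_growth'],
--         'phy_zone': ['physiography_zone', 'physiographic_zone'],
--         'district_code': ['district']
--     }
--
--     # the alias groups are pairwise disjoint, so each lowercased alias has one group id
--     group_of = {a.lower(): key for key, group in aliases.items() for a in group}
--
--     # lowercased target name -> first target column with that name
--     first_target = {}
--     for t in target_columns.keys():
--         first_target.setdefault(t.lower(), t)
--
--     # one pass over the sources: direct-match it, or park it in its group's FIFO queue
--     mapping = {}
--     queues = {}
--     for s in source_columns.keys():
--         t = first_target.get(s.lower())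
--         if t is not None:
--             mapping[s] = t
--         else:
--             g = group_of.get(s.lower())
--             if g is not None:
--                 queues.setdefault(g, []).append(s)
--
--     # one pass over the targets: an unmatched aliased target consumes its queue's front
--     mapped_targets = set(mapping.values())
--     for t in target_columns.keys():
--         if t in mapped_targets:
--             continue
--         g = group_of.get(t.lower())
--         if g is None:
--             continue
--         q = queues.get(g)
--         if q:
--             mapping[q.pop(0)] = t
--             mapped_targets.add(t)
--
--     return mapping
-- ===== Notes on version B (the rewrite author's own statement) =====
-- stated objective: faster
-- what changed: Replaces A's nested rescans (inner target loop per source; per target a scan of the whole alias table plus a scan of all sources re-lowering lists inside every check) by a bucket-queue matching: one pass over the sources direct-matches each source against a prebuilt lowercased-target-name index or parks it in its alias group's FIFO queue, then one pass over the targets pops the front of its group's queue, so no inner scan over sources or alias groups remains.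
import Mathlib
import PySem

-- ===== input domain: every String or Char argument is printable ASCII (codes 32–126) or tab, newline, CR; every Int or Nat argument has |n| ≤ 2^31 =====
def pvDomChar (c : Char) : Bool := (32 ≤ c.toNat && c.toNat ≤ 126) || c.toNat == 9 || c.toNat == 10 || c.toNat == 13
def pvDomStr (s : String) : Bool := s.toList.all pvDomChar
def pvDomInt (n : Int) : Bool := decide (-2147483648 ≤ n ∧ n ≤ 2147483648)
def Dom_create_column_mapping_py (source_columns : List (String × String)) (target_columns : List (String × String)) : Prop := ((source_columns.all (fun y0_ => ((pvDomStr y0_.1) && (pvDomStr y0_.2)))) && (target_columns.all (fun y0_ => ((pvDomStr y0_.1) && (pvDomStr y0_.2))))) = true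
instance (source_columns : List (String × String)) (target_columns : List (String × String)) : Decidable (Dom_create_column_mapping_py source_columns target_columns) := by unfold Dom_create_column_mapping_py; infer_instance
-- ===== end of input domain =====

-- B replaces A's per-target rescans of the alias table and of the whole source list by a
-- bucket-queue matching: one pass over the sources direct-matches each source or parks it in its
-- alias group's FIFO queue, then one pass over the targets pops the front of its group's queue
-- (objective: alternative algorithm; both sides iterate the data differently).

-- The aliases table from the Python source (both versions contain this same literal).
def pvAliases : List (String × List String) :=
  [ ("dbh", ["diameter", "dbh_cm", "diameter_cm", "tree_and_climber_dbh"]),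
    ("height", ["ht", "height_m", "tree_height"]),
    ("species_code", ["species", "sp_code", "species_id", "tree_and_climber_species_code"]),
    ("plot_id", ["plot", "plot_number", "plot_no", "plot_id_"]),
    ("tree_no", ["tree_id", "tree_number", "tree"]),
    ("plot_col", ["col", "column"]),
    ("plot_row", ["row"]),
    ("plot_number", ["number", "plot_num"]),
    ("plot_x", ["utm_coordinate_x", "x_coordinate", "x"]),
    ("plot_y", ["utm_coordinate_y", "y_coordinate", "y"]),
    ("forest_stand", ["tree_and_climber_forest_stand", "stand"]),
    ("bearing", ["tree_and_climber_bearing"]),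
    ("distance", ["tree_and_climber_distance"]),
    ("quality_class", ["quality_class"]),
    ("quality_class_code", ["quality_class_code_id_"]),
    ("crown_class", ["crown_class"]),
    ("crown_class_code", ["crown_class_code_id_"]),
    ("sample_tree_type", ["sample_tree_type"]),
    ("sample_tree_type_code", ["sample_tree_type_code_id_"]),
    ("crown_height", ["crown_height"]),
    ("base_tree_height", ["base_tree_height"]),
    ("base_crown_height", ["base_crown_height"]),
    ("base_slope", ["base_slope"]),
    ("age", ["age"]),
    ("radial_growth", ["radial_growth"]),
    ("phy_zone", ["physiography_zone", "physiographic_zone"]),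
    ("district_code", ["district"]) ]

-- ===== PORT A =====
-- phase 1: for each source, first target with equal lowercase name (break = find?)
def pvA_phase1Step (target_columns : List (String × String))
    (m : PySem.Dict String String) (sc : String × String) : PySem.Dict String String :=
  match target_columns.find? (fun tc => PySem.Str.lower sc.1 == PySem.Str.lower tc.1) with
  | some tc => m.insert sc.1 tc.1
  | none => m

-- phase 2: for each target not yet a mapped value, scan every alias group; in a matching group,
-- map the first still-unmapped source whose lowercase name is in the group (break = find?)
def pvA_phase2Step (source_columns : List (String × String))
    (m : PySem.Dict String String) (tc : String × String) : PySem.Dict String String :=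
  if m.values.contains tc.1 then m
  else
    (pvAliases.map (·.2)).foldl (fun m g =>
      if (g.map PySem.Str.lower).contains (PySem.Str.lower tc.1) then
        match source_columns.find? (fun sc =>
            (g.map PySem.Str.lower).contains (PySem.Str.lower sc.1) && !(m.contains sc.1)) with
        | some sc => m.insert sc.1 tc.1
        | none => m
      else m) m

def create_column_mapping_py (source_columns : List (String × String)) (target_columns : List (String × String)) : List (String × String) :=
  ((target_columns.foldl (pvA_phase2Step source_columns)
      (source_columns.foldl (pvA_phase1Step target_columns) PySem.Dict.empty)).items)

-- ===== PORT B =====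
-- group_of: lowercased alias -> the key of its group (dict comprehension, built once)
def pvB_groupOf : PySem.Dict String String :=
  pvAliases.foldl (fun d kg =>
    kg.2.foldl (fun d a => d.insert (PySem.Str.lower a) kg.1) d) PySem.Dict.empty

-- first_target: lowercased target name -> first target column with that name (setdefault)
def pvB_targetIdx (target_columns : List (String × String)) : PySem.Dict String String :=
  target_columns.foldl (fun d tc => d.setdefault (PySem.Str.lower tc.1) tc.1) PySem.Dict.empty

-- one pass over the sources: direct-match, or park the source in its group's queue
def pvB_scanStep (tidx : PySem.Dict String String)
    (st : PySem.Dict String String × PySem.Dict String (List String)) (sc : String × String) :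
    PySem.Dict String String × PySem.Dict String (List String) :=
  match tidx.get? (PySem.Str.lower sc.1) with
  | some t => (st.1.insert sc.1 t, st.2)
  | none =>
    match pvB_groupOf.get? (PySem.Str.lower sc.1) with
    | some g => (st.1, st.2.insert g (st.2.getD g [] ++ [sc.1]))
    | none => st

-- one pass over the targets: an unmatched aliased target consumes its queue's front
def pvB_assignStep
    (st : PySem.Dict String String × PySem.Dict String (List String) × PySem.Set String)
    (tc : String × String) :
    PySem.Dict String String × PySem.Dict String (List String) × PySem.Set String :=
  if PySem.Set.contains st.2.2 tc.1 then st
  else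
    match pvB_groupOf.get? (PySem.Str.lower tc.1) with
    | none => st
    | some g =>
      match st.2.1.getD g [] with
      | [] => st
      | s :: rest => (st.1.insert s tc.1, st.2.1.insert g rest, PySem.Set.add st.2.2 tc.1)

def create_column_mapping_py_alt (source_columns : List (String × String)) (target_columns : List (String × String)) : List (String × String) :=
  let scanned := source_columns.foldl (pvB_scanStep (pvB_targetIdx target_columns))
      (PySem.Dict.empty, PySem.Dict.empty)
  (target_columns.foldl pvB_assignStep
      (scanned.1, scanned.2, PySem.Set.ofList scanned.1.values)).1.items

-- ===== PRECONDITION & SPEC =====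
-- Pre_ excludes association lists whose SOURCE keys repeat: a Python dict cannot hold duplicate
-- keys, so such lists represent no input of A, and the ports' behaviour there is
-- representation-dependent (the queue may hand the same source name to two targets).
def Pre_create_column_mapping_py (source_columns : List (String × String)) (target_columns : List (String × String)) : Prop :=
  (source_columns.map (·.1)).Nodup
instance (source_columns : List (String × String)) (target_columns : List (String × String)) : Decidable (Pre_create_column_mapping_py source_columns target_columns) := by unfold Pre_create_column_mapping_py; infer_instance

def pvWitness_create_column_mapping_py : (List (String × String)) × (List (String × String)) :=
  ([("DBH", "n"), ("ht", "n")], [("dbh", "n"), ("height", "n")])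

def Spec_create_column_mapping_py (source_columns : List (String × String)) (target_columns : List (String × String)) (out : List (String × String)) : Prop := out = create_column_mapping_py_alt source_columns target_columns
instance (source_columns : List (String × String)) (target_columns : List (String × String)) (out : List (String × String)) : Decidable (Spec_create_column_mapping_py source_columns target_columns out) := by unfold Spec_create_column_mapping_py; infer_instance

-- ===== CLAIM (what is proved, stated in full; the proofs are below) =====
def Claim_equal_create_column_mapping_py : Prop := ∀ (source_columns : List (String × String)) (target_columns : List (String × String)), Dom_create_column_mapping_py source_columns target_columns → Pre_create_column_mapping_py source_columns target_columns → Spec_create_column_mapping_py source_columns target_columns (create_column_mapping_py source_columns target_columns)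

-- ===== LEMMAS AND PROOFS =====

-- lookup in the setdefault-built target index = first target with that lowercase name
theorem pv_targetIdx_fold_get (ts : List (String × String)) (d : PySem.Dict String String) (k : String) :
    (ts.foldl (fun d tc => d.setdefault (PySem.Str.lower tc.1) tc.1) d).get? k =
      match d.get? k with
      | some v => some v
      | none => (ts.find? (fun tc => PySem.Str.lower tc.1 == k)).map (·.1) := by
  induction ts generalizing d with
  | nil =>
    simp only [List.foldl_nil, List.find?_nil, Option.map_none]
    cases hd : d.get? k <;> rfl
  | cons t ts ih =>
    simp only [List.foldl_cons, ih]
    by_cases h : PySem.Str.lower t.1 = k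
    · subst h
      rw [PySem.Dict.get?_setdefault_self,
          List.find?_cons_of_pos (by simp)]
      cases hd : d.get? (PySem.Str.lower t.1) <;> simp
    · rw [PySem.Dict.get?_setdefault_of_ne d t.1 (Ne.symm h),
          List.find?_cons_of_neg (by simpa using h)]

theorem pv_targetIdx_get (ts : List (String × String)) (k : String) :
    (pvB_targetIdx ts).get? k = (ts.find? (fun tc => PySem.Str.lower tc.1 == k)).map (·.1) := by
  unfold pvB_targetIdx
  rw [pv_targetIdx_fold_get]
  simp

-- inserting the same value at every key of g: lookup
theorem pv_inner_insert_get {ν : Type} (g : List String) (v : ν)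
    (d : PySem.Dict String ν) (k : String) :
    (g.foldl (fun d a => d.insert a v) d).get? k =
      if g.contains k then some v else d.get? k := by
  induction g generalizing d with
  | nil => simp
  | cons a g ih =>
    simp only [List.foldl_cons, ih, List.contains_cons]
    rw [PySem.Dict.get?_insert]
    cases hg : g.contains k <;> by_cases hk : k = a <;> simp [hk]

-- lookup in the alias->group-key index, last writer wins
theorem pv_outer_insert_get (gs : List (String × List String)) (d : PySem.Dict String String) (k : String) :
    (gs.foldl (fun d kg => kg.2.foldl (fun d a => d.insert (PySem.Str.lower a) kg.1) d) d).get? k =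
      match gs.reverse.find? (fun kg => (kg.2.map PySem.Str.lower).contains k) with
      | some kg => some kg.1
      | none => d.get? k := by
  induction gs generalizing d with
  | nil => simp
  | cons kg gs ih =>
    simp only [List.foldl_cons, ih, List.reverse_cons, List.find?_append]
    cases hr : gs.reverse.find? (fun kg => (kg.2.map PySem.Str.lower).contains k) with
    | some h => rfl
    | none =>
      rw [show kg.2.foldl (fun d a => d.insert (PySem.Str.lower a) kg.1) d
            = (kg.2.map PySem.Str.lower).foldl (fun d a => d.insert a kg.1) d by
          rw [List.foldl_map],
        pv_inner_insert_get]
      cases hg : (kg.2.map PySem.Str.lower).contains k with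
      | true =>
        have hg' : decide (∃ a ∈ kg.2, PySem.Str.lower a = k) = true := by simpa using hg
        simp [List.find?, hg']
      | false =>
        have hg' : decide (∃ a ∈ kg.2, PySem.Str.lower a = k) = false := by simpa using hg
        simp [List.find?, hg']

-- with at most one match, find? on the reverse is find?
theorem pv_reverse_find? {α : Type} (p : α → Bool) (l : List α)
    (h : (l.filter p).length ≤ 1) : l.reverse.find? p = l.find? p := by
  induction l with
  | nil => simp
  | cons a l ih =>
    simp only [List.reverse_cons, List.find?_append]
    by_cases ha : p a
    · have hnil : l.filter p = [] := by
        simp only [List.filter_cons, ha, if_pos] at h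
        cases hf : l.filter p with
        | nil => rfl
        | cons x xs => rw [hf] at h; simp at h
      have hnone : l.reverse.find? p = none := by
        rw [List.find?_eq_none]
        intro x hx hp
        have : x ∈ l.filter p := List.mem_filter.mpr ⟨List.mem_reverse.mp hx, hp⟩
        simp [hnil] at this
      rw [hnone, List.find?_cons_of_pos ha, List.find?_cons_of_pos ha]
      rfl
    · simp only [List.filter_cons, ha] at h
      rw [ih (by simpa using h), List.find?_cons_of_neg ha, List.find?_nil, Option.or_none, List.find?_cons_of_neg ha]

-- a guarded fold where no element passes is the identity
theorem pv_foldl_guard_id {α β : Type} (p : β → Bool) (f : β → α → α) (gs : List β)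
    (h : ∀ g ∈ gs, p g = false) (m : α) :
    gs.foldl (fun m g => if p g then f g m else m) m = m := by
  induction gs generalizing m with
  | nil => rfl
  | cons g gs ih =>
    simp only [List.foldl_cons, h g (by simp), Bool.false_eq_true, if_false]
    exact ih (fun g hg => h g (by simp [hg])) m

-- a guarded fold with at most one passing element is a single application at the first match
theorem pv_foldl_guard_unique {α β : Type} (p : β → Bool) (f : β → α → α) (gs : List β)
    (h : (gs.filter p).length ≤ 1) (m : α) :
    gs.foldl (fun m g => if p g then f g m else m) m =
      match gs.find? p with
      | some g => f g m
      | none => m := by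
  induction gs generalizing m with
  | nil => rfl
  | cons g gs ih =>
    simp only [List.foldl_cons]
    by_cases hg : p g
    · have hnil : gs.filter p = [] := by
        simp only [List.filter_cons, hg, if_pos] at h
        cases hf : gs.filter p with
        | nil => rfl
        | cons x xs => rw [hf] at h; simp at h
      have hall : ∀ x ∈ gs, p x = false := by
        intro x hx
        by_contra hp
        have : x ∈ gs.filter p := List.mem_filter.mpr ⟨hx, by simpa using hp⟩
        simp [hnil] at this
      rw [if_pos hg, pv_foldl_guard_id p f gs hall, List.find?_cons_of_pos hg]
    · rw [if_neg (by simp [hg]), ih (by simpa [List.filter_cons, hg] using h),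
          List.find?_cons_of_neg hg]

-- the lowered alias groups are pairwise disjoint (checked by computation)
theorem pv_groups_disjoint :
    List.Pairwise (fun g h : String × List String =>
      (g.2.map PySem.Str.lower).all (fun x => !((h.2.map PySem.Str.lower).contains x)) = true)
      pvAliases := by decide

-- the alias-group keys are distinct (checked by computation)
theorem pv_keys_nodup : (pvAliases.map (·.1)).Nodup := by decide

-- pairwise disjoint groups: any key lies in at most one of them
theorem pv_disjoint_filter (gs : List (String × List String))
    (hd : List.Pairwise (fun g h : String × List String =>
      (g.2.map PySem.Str.lower).all (fun x => !((h.2.map PySem.Str.lower).contains x)) = true) gs)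
    (k : String) :
    (gs.filter (fun kg => (kg.2.map PySem.Str.lower).contains k)).length ≤ 1 := by
  induction gs with
  | nil => simp
  | cons g gs ih =>
    rw [List.pairwise_cons] at hd
    simp only [List.filter_cons]
    by_cases hg : (g.2.map PySem.Str.lower).contains k
    · have hnil : gs.filter (fun kg => (kg.2.map PySem.Str.lower).contains k) = [] := by
        rw [List.filter_eq_nil_iff]
        intro x hx
        have hall := hd.1 x hx
        rw [List.all_eq_true] at hall
        have hk := hall k (by simpa using hg)
        simpa using hk
      rw [if_pos hg, hnil]
      simp
    · rw [if_neg hg]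
      exact ih hd.2

-- any key lies in at most one alias group
theorem pv_filter_le_one (k : String) :
    (pvAliases.filter (fun kg => (kg.2.map PySem.Str.lower).contains k)).length ≤ 1 :=
  pv_disjoint_filter _ pv_groups_disjoint k

-- the alias->group-key dict looks up the (unique) group containing the alias
theorem pv_groupOf_get (k : String) :
    pvB_groupOf.get? k =
      (pvAliases.find? (fun kg => (kg.2.map PySem.Str.lower).contains k)).map (·.1) := by
  unfold pvB_groupOf
  rw [pv_outer_insert_get, pv_reverse_find? _ _ (pv_filter_le_one k)]
  cases pvAliases.find? (fun kg => (kg.2.map PySem.Str.lower).contains k) <;> simp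

-- membership in a found group = the alias->group-key lookup returns that group's key
theorem pv_group_mem_iff (x : String) (kg : String × List String)
    (hf : pvAliases.find? (fun kg => (kg.2.map PySem.Str.lower).contains x) = some kg)
    (y : String) :
    ((kg.2.map PySem.Str.lower).contains y) = (pvB_groupOf.get? y == some kg.1) := by
  have hmem : kg ∈ pvAliases := List.mem_of_find?_eq_some hf
  rw [pv_groupOf_get]
  cases hy : (kg.2.map PySem.Str.lower).contains y with
  | true =>
    have : kg ∈ pvAliases.filter (fun kg => (kg.2.map PySem.Str.lower).contains y) :=
      List.mem_filter.mpr ⟨hmem, hy⟩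
    have hfind : pvAliases.find? (fun kg => (kg.2.map PySem.Str.lower).contains y) = some kg := by
      rw [← List.head?_filter]
      rcases hfl : pvAliases.filter (fun kg => (kg.2.map PySem.Str.lower).contains y) with _ | ⟨a, t⟩
      · rw [hfl] at this; simp at this
      · have hlen := pv_filter_le_one y
        rw [hfl] at hlen this
        cases t with
        | nil =>
          have hka : kg = a := by simpa using this
          subst hka
          rw [hfl]
          rfl
        | cons b t => simp at hlen
    rw [hfind]; simp
  | false =>
    cases hfy : pvAliases.find? (fun kg => (kg.2.map PySem.Str.lower).contains y) with
    | none => simp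
    | some kg' =>
      have hk' : kg' ∈ pvAliases := List.mem_of_find?_eq_some hfy
      have hp' : ((kg'.2.map PySem.Str.lower).contains y) = true :=
        List.find?_some (p := fun kg : String × List String =>
          (kg.2.map PySem.Str.lower).contains y) hfy
      simp only [Option.map_some]
      cases hb : (some kg'.1 == some kg.1) with
      | false => rfl
      | true =>
        exfalso
        have : kg'.1 = kg.1 := by simpa using hb
        have : kg' = kg := List.inj_on_of_nodup_map pv_keys_nodup hk' hmem this
        rw [this] at hp'
        rw [hp'] at hy
        exact Bool.true_eq_false.mp hy

-- A's phase-2 step in first-match form (the alias-table scan hits at most one group)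
def pvCanonStep (source_columns : List (String × String))
    (m : PySem.Dict String String) (tc : String × String) : PySem.Dict String String :=
  if m.values.contains tc.1 then m
  else
    match pvAliases.find? (fun kg => (kg.2.map PySem.Str.lower).contains (PySem.Str.lower tc.1)) with
    | none => m
    | some kg =>
      match source_columns.find? (fun sc =>
          (kg.2.map PySem.Str.lower).contains (PySem.Str.lower sc.1) && !(m.contains sc.1)) with
      | some sc => m.insert sc.1 tc.1
      | none => m

theorem pv_canon_eq (s : List (String × String)) : pvA_phase2Step s = pvCanonStep s := by
  funext m tc
  unfold pvA_phase2Step pvCanonStep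
  by_cases hv : m.values.contains tc.1
  · rw [if_pos hv, if_pos hv]
  · rw [if_neg hv, if_neg hv]
    have hlen : (((pvAliases.map (·.2)).filter
        (fun g => (g.map PySem.Str.lower).contains (PySem.Str.lower tc.1))).length ≤ 1) := by
      rw [List.filter_map]
      simpa using pv_filter_le_one (PySem.Str.lower tc.1)
    rw [pv_foldl_guard_unique _ _ _ hlen m, List.find?_map]
    have hcomp : ((fun g : List String =>
          (g.map PySem.Str.lower).contains (PySem.Str.lower tc.1)) ∘ (fun kg : String × List String => kg.2))
        = (fun kg : String × List String =>
          (kg.2.map PySem.Str.lower).contains (PySem.Str.lower tc.1)) := rfl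
    rw [hcomp]
    cases pvAliases.find? (fun kg => (kg.2.map PySem.Str.lower).contains (PySem.Str.lower tc.1)) <;> rfl

-- phase 1: B's scan builds exactly A's direct-match dict in its first component
theorem pv_scan_mapping (t : List (String × String)) (s : List (String × String))
    (m0 : PySem.Dict String String) (q0 : PySem.Dict String (List String)) :
    ((s.foldl (pvB_scanStep (pvB_targetIdx t)) (m0, q0)).1) = s.foldl (pvA_phase1Step t) m0 := by
  induction s generalizing m0 q0 with
  | nil => rfl
  | cons sc s ih =>
    simp only [List.foldl_cons]
    have hstep : pvB_scanStep (pvB_targetIdx t) (m0, q0) sc =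
        ((pvA_phase1Step t m0 sc),
          (pvB_scanStep (pvB_targetIdx t) (m0, q0) sc).2) := by
      unfold pvB_scanStep pvA_phase1Step
      rw [pv_targetIdx_get]
      have hp : (fun tc : String × String => PySem.Str.lower tc.1 == PySem.Str.lower sc.1)
          = (fun tc : String × String => PySem.Str.lower sc.1 == PySem.Str.lower tc.1) := by
        funext tc; exact Bool.beq_comm
      rw [hp]
      cases t.find? (fun tc => PySem.Str.lower sc.1 == PySem.Str.lower tc.1) with
      | some tc => rfl
      | none => cases pvB_groupOf.get? (PySem.Str.lower sc.1) <;> rfl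
    rw [hstep, ih]

-- membership in the direct-match dict is decided by the target index
theorem pv_phase1_contains (t : List (String × String)) (s : List (String × String))
    (m0 : PySem.Dict String String) (x : String) :
    (s.foldl (pvA_phase1Step t) m0).contains x =
      (m0.contains x ||
        (s.any (fun sc => sc.1 == x) && ((pvB_targetIdx t).get? (PySem.Str.lower x)).isSome)) := by
  induction s generalizing m0 with
  | nil => simp
  | cons sc s ih
  =>
    simp only [List.foldl_cons, List.any_cons, ih]
    unfold pvA_phase1Step
    by_cases hx : sc.1 = x
    · subst hx
      rw [pv_targetIdx_get]
      have hp : (fun tc : String × String => PySem.Str.lower tc.1 == PySem.Str.lower sc.1)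
          = (fun tc : String × String => PySem.Str.lower sc.1 == PySem.Str.lower tc.1) := by
        funext tc; exact Bool.beq_comm
      rw [hp]
      cases hf : t.find? (fun tc => PySem.Str.lower sc.1 == PySem.Str.lower tc.1) with
      | some tc =>
        rw [PySem.Dict.contains_insert]
        simp
      | none => simp
    · have hx' : (sc.1 == x) = false := by simpa using hx
      cases hf : t.find? (fun tc => PySem.Str.lower sc.1 == PySem.Str.lower tc.1) with
      | some tc =>
        rw [PySem.Dict.contains_insert]
        have : (x == sc.1) = false := by simp [Ne.symm hx]
        rw [this, Bool.false_or, hx', Bool.false_or]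
      | none => rw [hx', Bool.false_or]

-- B's scan: each group's queue holds, in order, the unmatched sources of that group
theorem pv_scan_queues (tidx : PySem.Dict String String) (s : List (String × String))
    (m0 : PySem.Dict String String) (q0 : PySem.Dict String (List String)) (k : String) :
    ((s.foldl (pvB_scanStep tidx) (m0, q0)).2).getD k [] =
      q0.getD k [] ++ ((s.filter (fun sc =>
        (tidx.get? (PySem.Str.lower sc.1)).isNone
          && (pvB_groupOf.get? (PySem.Str.lower sc.1) == some k))).map (·.1)) := by
  induction s generalizing m0 q0 with
  | nil => simp
  | cons sc s ih =>
    simp only [List.foldl_cons, List.filter_cons]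
    cases ht : tidx.get? (PySem.Str.lower sc.1) with
    | some tv =>
      have hstep : pvB_scanStep tidx (m0, q0) sc = (m0.insert sc.1 tv, q0) := by
        unfold pvB_scanStep; rw [ht]
      have hpred : (((some tv : Option String)).isNone
          && (pvB_groupOf.get? (PySem.Str.lower sc.1) == some k)) = false := by
        simp
      rw [hstep, hpred]
      simp only [Bool.false_eq_true, if_false]
      exact ih (m0.insert sc.1 tv) q0
    | none =>
      cases hg : pvB_groupOf.get? (PySem.Str.lower sc.1) with
      | none =>
        have hstep : pvB_scanStep tidx (m0, q0) sc = (m0, q0) := by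
          unfold pvB_scanStep; rw [ht, hg]
        have hpred : (((none : Option String)).isNone
            && ((none : Option String) == some k)) = false := rfl
        rw [hstep, hpred]
        simp only [Bool.false_eq_true, if_false]
        exact ih m0 q0
      | some g =>
        have hstep : pvB_scanStep tidx (m0, q0) sc
            = (m0, q0.insert g (q0.getD g [] ++ [sc.1])) := by
          unfold pvB_scanStep; rw [ht, hg]
        rw [hstep, ih m0 (q0.insert g (q0.getD g [] ++ [sc.1]))]
        by_cases hk : g = k
        · subst hk
          have hpred : (((none : Option String)).isNone
              && ((some g : Option String) == some g)) = true := by simp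
          rw [hpred, if_pos rfl, PySem.Dict.getD_insert, if_pos rfl]
          simp
        · have hpred : (((none : Option String)).isNone
              && ((some g : Option String) == some k)) = false := by simp [hk]
          rw [hpred, PySem.Dict.getD_insert, if_neg (Ne.symm hk)]
          simp only [Bool.false_eq_true, if_false]

-- values of a fresh insert append
theorem pv_values_insert (d : PySem.Dict String String) (k v : String)
    (h : d.contains k = false) : (d.insert k v).values = d.values ++ [v] := by
  simp only [PySem.Dict.values, PySem.Dict.items_insert_of_not_contains d v h, List.map_append]
  rfl

-- Set.contains after ofList / add, on the Bool level
theorem pv_set_ofList_contains (l : List String) (x : String) :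
    PySem.Set.contains (PySem.Set.ofList l) x = l.contains x := by
  rw [PySem.Set.contains_eq_listContains]
  cases hm : l.contains x with
  | true =>
    have hx : x ∈ PySem.Set.ofList l :=
      (PySem.Set.mem_ofList l x).mpr (by simpa using hm)
    simpa using hx
  | false =>
    cases hc : List.contains (PySem.Set.ofList l) x with
    | false => rfl
    | true =>
      have hx : x ∈ l := (PySem.Set.mem_ofList l x).mp (by simpa using hc)
      simp [hx] at hm

theorem pv_set_add_contains (s : PySem.Set String) (x y : String) :
    PySem.Set.contains (PySem.Set.add s x) y = (PySem.Set.contains s y || (y == x)) := by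
  simp only [PySem.Set.contains_eq_listContains]
  rw [PySem.Set.add_eq_ite]
  by_cases hx : x ∈ s
  · rw [if_pos hx]
    by_cases hxy : y = x
    · subst hxy
      have h1 : List.contains s y = true := by simpa using hx
      have h2 : (y == y) = true := by simp
      rw [h1, h2]
      rfl
    · have h2 : (y == x) = false := by simpa using hxy
      rw [h2, Bool.or_false]
  · rw [if_neg hx, List.contains_append]
    have h3 : List.contains [x] y = (y == x) := by
      cases hyx : y == x with
      | true =>
        have he : y = x := by simpa using hyx
        subst he
        simp
      | false =>
        have hne : y ≠ x := by simpa using hyx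
        simp [hne]
    rw [h3]

-- the two step functions, written out (definitional equalities used to rewrite one step)
set_option maxRecDepth 8192 in
theorem pv_assignStep_eq (m : PySem.Dict String String) (qs : PySem.Dict String (List String))
    (mset : PySem.Set String) (tc : String × String) :
    pvB_assignStep (m, qs, mset) tc =
      if PySem.Set.contains mset tc.1 then (m, qs, mset)
      else
        match pvB_groupOf.get? (PySem.Str.lower tc.1) with
        | none => (m, qs, mset)
        | some g =>
          match qs.getD g [] with
          | [] => (m, qs, mset)
          | s :: rest => (m.insert s tc.1, qs.insert g rest, PySem.Set.add mset tc.1) := rfl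

set_option maxRecDepth 8192 in
theorem pv_canonStep_eq (s : List (String × String)) (m : PySem.Dict String String)
    (tc : String × String) :
    pvCanonStep s m tc =
      if m.values.contains tc.1 then m
      else
        match pvAliases.find? (fun kg => (kg.2.map PySem.Str.lower).contains (PySem.Str.lower tc.1)) with
        | none => m
        | some kg =>
          match s.find? (fun sc =>
              (kg.2.map PySem.Str.lower).contains (PySem.Str.lower sc.1) && !(m.contains sc.1)) with
          | some sc => m.insert sc.1 tc.1
          | none => m := rfl

-- the main invariant induction: B's target pass computes A's phase-2 fold
theorem pv_main (s : List (String × String)) (hnd : (s.map (·.1)).Nodup)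
    (ts : List (String × String)) (m : PySem.Dict String String)
    (qs : PySem.Dict String (List String)) (mset : PySem.Set String)
    (hvals : ∀ x, PySem.Set.contains mset x = m.values.contains x)
    (hq : ∀ k, qs.getD k [] = ((s.filter (fun sc =>
        (pvB_groupOf.get? (PySem.Str.lower sc.1) == some k) && !(m.contains sc.1))).map (·.1))) :
    (ts.foldl pvB_assignStep (m, qs, mset)).1 = ts.foldl (pvCanonStep s) m := by
  induction ts generalizing m qs mset with
  | nil => rfl
  | cons tc ts ih =>
    simp only [List.foldl_cons]
    rw [pv_assignStep_eq, pv_canonStep_eq]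
    rw [hvals tc.1]
    by_cases hv : m.values.contains tc.1 = true
    · rw [if_pos hv, if_pos hv]
      exact ih m qs mset hvals hq
    · rw [if_neg hv, if_neg hv]
      rw [pv_groupOf_get]
      cases hgf : pvAliases.find? (fun kg =>
          (kg.2.map PySem.Str.lower).contains (PySem.Str.lower tc.1)) with
      | none =>
        simp only [Option.map_none]
        exact ih m qs mset hvals hq
      | some kg =>
        simp only [Option.map_some]
        -- the two find?/queue predicates agree
        have hpred : (fun sc : String × String =>
            (kg.2.map PySem.Str.lower).contains (PySem.Str.lower sc.1) && !(m.contains sc.1))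
            = (fun sc : String × String =>
            (pvB_groupOf.get? (PySem.Str.lower sc.1) == some kg.1) && !(m.contains sc.1)) := by
          funext sc
          rw [pv_group_mem_iff (PySem.Str.lower tc.1) kg hgf]
        rw [hq kg.1, hpred, ← List.head?_filter]
        cases hfl : s.filter (fun sc =>
            (pvB_groupOf.get? (PySem.Str.lower sc.1) == some kg.1) && !(m.contains sc.1)) with
        | nil =>
          simp only [List.map_nil, List.head?_nil]
          exact ih m qs mset hvals hq
        | cons sc1 rest =>
          simp only [List.map_cons, List.head?_cons]
          have hmemf : sc1 ∈ s.filter (fun sc =>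
              (pvB_groupOf.get? (PySem.Str.lower sc.1) == some kg.1) && !(m.contains sc.1)) := by
            rw [hfl]; exact List.mem_cons_self
          have hsc1s : sc1 ∈ s := (List.mem_filter.mp hmemf).1
          have hsc1p := (List.mem_filter.mp hmemf).2
          have hsc1g : (pvB_groupOf.get? (PySem.Str.lower sc1.1) == some kg.1) = true := by
            cases hx : (pvB_groupOf.get? (PySem.Str.lower sc1.1) == some kg.1) with
            | true => rfl
            | false => rw [hx, Bool.false_and] at hsc1p; exact absurd hsc1p (by simp)
          have hsc1m : m.contains sc1.1 = false := by
            cases hx : m.contains sc1.1 with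
            | false => rfl
            | true => rw [hx] at hsc1p; simp at hsc1p
          have hsub : (sc1 :: rest).Sublist s := by
            rw [← hfl]; exact List.filter_sublist
          have hnd2 : (sc1.1 :: rest.map (·.1)).Nodup := by
            have := List.Nodup.sublist (List.Sublist.map (fun x => x.1) hsub) hnd
            simpa using this
          have hnotmem : sc1.1 ∉ rest.map (·.1) := (List.nodup_cons.mp hnd2).1
          have hrest : ∀ sc ∈ rest, (sc.1 == sc1.1) = false := by
            intro sc hsc
            have hne : sc.1 ≠ sc1.1 := by
              intro he
              exact hnotmem (he ▸ List.mem_map_of_mem hsc)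
            simpa using hne
          apply ih
          · -- values invariant
            intro x
            rw [pv_set_add_contains, hvals x, pv_values_insert m sc1.1 tc.1 hsc1m,
              List.contains_append]
            have h1 : List.contains [tc.1] x = (x == tc.1) := by
              cases hyx : x == tc.1 with
              | true =>
                have he : x = tc.1 := by simpa using hyx
                subst he; simp
              | false =>
                have hne : x ≠ tc.1 := by simpa using hyx
                simp [hne]
            rw [h1]
          · -- queue invariant
            intro k
            by_cases hk : k = kg.1
            · rw [hk, PySem.Dict.getD_insert, if_pos rfl]
              have hstep2 : s.filter (fun sc =>
                  (pvB_groupOf.get? (PySem.Str.lower sc.1) == some kg.1)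
                    && !((m.insert sc1.1 tc.1).contains sc.1))
                  = (s.filter (fun sc =>
                  (pvB_groupOf.get? (PySem.Str.lower sc.1) == some kg.1)
                    && !(m.contains sc.1))).filter (fun sc => !(sc.1 == sc1.1)) := by
                rw [List.filter_filter]
                apply List.filter_congr
                intro sc _
                rw [PySem.Dict.contains_insert]
                cases pvB_groupOf.get? (PySem.Str.lower sc.1) == some kg.1 <;>
                  cases sc.1 == sc1.1 <;> simp
              rw [hstep2, hfl, List.filter_cons]
              simp only [beq_self_eq_true, Bool.not_true, Bool.false_eq_true, if_false]
              have hres : rest.filter (fun sc => !(sc.1 == sc1.1)) = rest := by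
                apply List.filter_eq_self.mpr
                intro sc hsc
                rw [hrest sc hsc]
                rfl
              rw [hres]
            · rw [PySem.Dict.getD_insert, if_neg hk, hq k]
              apply congrArg
              apply List.filter_congr
              intro sc _
              cases hgc : pvB_groupOf.get? (PySem.Str.lower sc.1) == some k with
              | false => rw [Bool.false_and, Bool.false_and]
              | true =>
                rw [PySem.Dict.contains_insert]
                have hne : (sc.1 == sc1.1) = false := by
                  cases hce : sc.1 == sc1.1 with
                  | false => rfl
                  | true =>
                    exfalso
                    have he : sc.1 = sc1.1 := by simpa using hce
                    have hgeq : pvB_groupOf.get? (PySem.Str.lower sc1.1) = some kg.1 := by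
                      simpa using hsc1g
                    rw [he, hgeq] at hgc
                    have hkk : kg.1 = k := by simpa using hgc
                    exact hk hkk.symm
                rw [hne]
                simp

-- ===== VERDICT (by name: the statement is the Claim_ definition above) =====
theorem create_column_mapping_py_spec : Claim_equal_create_column_mapping_py := by
  intro s t _ hpre
  unfold Spec_create_column_mapping_py create_column_mapping_py create_column_mapping_py_alt
  rw [pv_canon_eq]
  apply congrArg
  rw [pv_scan_mapping t s PySem.Dict.empty PySem.Dict.empty]
  refine (pv_main s hpre t _ _ _ ?_ ?_).symm
  · intro x
    rw [pv_set_ofList_contains]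
  · intro k
    rw [pv_scan_queues (pvB_targetIdx t) s PySem.Dict.empty PySem.Dict.empty k]
    simp only [PySem.Dict.getD_empty, List.nil_append]
    apply congrArg
    apply List.filter_congr
    intro sc hsc
    rw [pv_phase1_contains t s PySem.Dict.empty sc.1]
    have hany : s.any (fun sc' => sc'.1 == sc.1) = true := by
      apply List.any_eq_true.mpr
      exact ⟨sc, hsc, by simp⟩
    rw [hany]
    simp only [PySem.Dict.contains_empty, Bool.false_or, Bool.true_and]
    cases hh : (pvB_targetIdx t).get? (PySem.Str.lower sc.1) <;>
      simp [Bool.and_comm]
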